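-- pv_equiv track=rewrite | github.com/edgar-ramxs/practica-uno-unab | Algorithmic-Heights/SQ.py | countCycles1
-- ===== SOURCE A (Python) =====
-- def countCycles1(graph: list, length_cycle: int):
--
--     def DFS(graph: list, marked: list, n: int, vert: int, start: int, count: int):
--         marked[vert] = True
--
--         if n == 0:
--             marked[vert] = False
--             if graph[vert][start] == 1:
--                 count = count + 1
--                 return count
--             else:
--                 return count
--
--         for i in range(len(graph)):
--             if marked[i] == False and graph[vert][i] == 1:
--                 count = DFS(graph, marked, n - 1, i, start, count)
--
--         marked[vert] = False
--         return count
--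
--     count = 0
--     marked = [False] * len(graph)
--
--     for i in range(len(graph) - (length_cycle - 1)):
--         count = DFS(graph, marked, length_cycle - 1, i, i, count)
--         marked[i] = True
--
--     if (count / 2) > 0:
--         return 1
--     return -1
-- ===== SOURCE B (Python) =====
-- def countCycles1(graph: list, length_cycle: int):
--     # Breadth-first, level-by-level enumeration of candidate simple paths
--     # (frontier lists) instead of A's recursive marked-array DFS counter.
--     n = len(graph)
--     if length_cycle < 1 or length_cycle > n:
--         return -1
--     for s in range(n):
--         paths = [[s]]
--         for _ in range(length_cycle - 1):
--             paths = [p + [v] for p in paths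
--                      for v in range(s + 1, n)
--                      if graph[p[-1]][v] == 1 and v not in p]
--         if any(graph[p[-1]][s] == 1 for p in paths):
--             return 1
--     return -1
-- ===== Notes on version B (the rewrite author's own statement) =====
-- stated objective: alternative
-- what changed: Replaces A's recursive marked-array DFS that counts all closing walks (then thresholds count/2 > 0) with a breadth-first, level-by-level expansion of frontier lists of simple paths per start vertex plus an existence check with early return.
-- outside the precondition, e.g. on countCycles1([[0, 0], [1]], 2): A returns -1, B returns -1
import Mathlib
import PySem

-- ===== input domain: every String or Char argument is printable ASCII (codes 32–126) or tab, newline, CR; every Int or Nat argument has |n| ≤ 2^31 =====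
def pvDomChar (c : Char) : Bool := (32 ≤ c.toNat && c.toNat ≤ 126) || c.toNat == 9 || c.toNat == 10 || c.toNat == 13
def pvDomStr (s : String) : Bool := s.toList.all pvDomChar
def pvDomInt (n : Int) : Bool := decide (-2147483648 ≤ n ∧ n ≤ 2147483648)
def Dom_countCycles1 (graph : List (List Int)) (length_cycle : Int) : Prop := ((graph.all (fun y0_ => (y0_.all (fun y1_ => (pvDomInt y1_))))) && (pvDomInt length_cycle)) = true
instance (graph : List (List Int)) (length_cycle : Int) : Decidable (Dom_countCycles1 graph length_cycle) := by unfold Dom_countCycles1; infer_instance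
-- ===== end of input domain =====

-- B replaces A's recursive marked-array DFS cycle counter by a level-by-level (breadth-first)
-- expansion of candidate simple-path frontiers with an existence check; same return value on Pre_.

-- ===== PORT A =====
-- Literal port of A's inner DFS. Python mutates `marked` but always restores it before
-- returning (every marked[vert]=True is undone), so the port threads the marked list by value
-- and returns only `count`; recursion is made total with a fuel argument (callers pass
-- graph.length + 1, which exceeds the recursion depth length_cycle on every input Pre_ admits;
-- the fuel = 0 branch is unreachable there).
def dfsA (g : List (List Int)) (fuel : Nat) (marked : List Bool) (n : Int) (vert start : Nat) (count : Int) : Int :=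
  match fuel with
  | 0 => count
  | Nat.succ fuel =>
    let m1 := marked.set vert true
    if n = 0 then
      if (g.getD vert []).getD start 0 == 1 then count + 1 else count
    else
      (List.range g.length).foldl
        (fun c i =>
          if (m1.getD i false == false) && ((g.getD vert []).getD i 0 == 1)
          then dfsA g fuel m1 (n - 1) i start c
          else c) count

-- Outer loop over range(len(graph) - (length_cycle - 1)); elements of the range are ≥ 0 so
-- .toNat is exact.  Python's final test `count / 2 > 0` uses float division and count ≥ 0,
-- so it is exactly `count > 0`.
def countCycles1 (graph : List (List Int)) (length_cycle : Int) : Int :=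
  if ((PySem.List.pyRange 0 ((graph.length : Int) - (length_cycle - 1)) 1).foldl
      (fun (st : Int × List Bool) i =>
        (dfsA graph (graph.length + 1) st.2 (length_cycle - 1) i.toNat i.toNat st.1,
         st.2.set i.toNat true))
      ((0 : Int), List.replicate graph.length false)).1 > 0 then 1 else -1

-- ===== PORT B =====
-- One expansion level of Source B's comprehension: every frontier path is nonempty (it starts
-- from [s]), so Python's p[-1] is exactly p.getLastD 0.
def pvWalkStep (g : List (List Int)) (s n : Nat) (paths : List (List Nat)) : List (List Nat) :=
  paths.flatMap (fun p =>
    (((List.range n).drop (s + 1)).filter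
      (fun v => ((g.getD (p.getLastD 0) []).getD v 0 == 1) && !(p.contains v))).map
      (fun v => p ++ [v]))

def countCycles1_alt (graph : List (List Int)) (length_cycle : Int) : Int :=
  if length_cycle < 1 || (graph.length : Int) < length_cycle then -1
  else if (List.range graph.length).any (fun s =>
      ((List.range (length_cycle - 1).toNat).foldl
          (fun ps _ => pvWalkStep graph s graph.length ps) [[s]]).any
        (fun p => ((graph.getD (p.getLastD 0) []).getD s 0 == 1)))
    then 1 else -1

-- ===== PRECONDITION & SPEC =====
-- Pre_ excludes exactly the inputs where Python A raises: length_cycle ≤ 0 (the DFS never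
-- reaches its base case and the outer loop finally indexes marked[len(graph)] — IndexError /
-- unbounded recursion), and graphs whose rows are too short for the indices A reads
-- (length_cycle = 1 reads only the diagonal; 2 ≤ length_cycle ≤ len(graph) scans whole rows,
-- where requiring every row to have length ≥ len(graph) is slightly stronger than A's exact,
-- reachability-dependent access pattern — see the cite in claim.json).
def Pre_countCycles1 (graph : List (List Int)) (length_cycle : Int) : Prop :=
  1 ≤ length_cycle ∧
  (length_cycle ≤ (graph.length : Int) →
    (if length_cycle = 1
     then ∀ i < graph.length, i < (graph.getD i []).length
     else ∀ row ∈ graph, graph.length ≤ row.length))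
instance (graph : List (List Int)) (length_cycle : Int) : Decidable (Pre_countCycles1 graph length_cycle) := by
  unfold Pre_countCycles1; infer_instance

def pvWitness_countCycles1 : List (List Int) × Int := ([[0, 1], [1, 0]], 2)

def Spec_countCycles1 (graph : List (List Int)) (length_cycle : Int) (out : Int) : Prop := out = countCycles1_alt graph length_cycle
instance (graph : List (List Int)) (length_cycle : Int) (out : Int) : Decidable (Spec_countCycles1 graph length_cycle out) := by unfold Spec_countCycles1; infer_instance

-- ===== CLAIM (what is proved, stated in full; the proofs are below) =====
def Claim_equal_countCycles1 : Prop := ∀ (graph : List (List Int)) (length_cycle : Int), Dom_countCycles1 graph length_cycle → Pre_countCycles1 graph length_cycle → Spec_countCycles1 graph length_cycle (countCycles1 graph length_cycle)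

-- ===== LEMMAS AND PROOFS =====

-- edge test shared by the proofs (the ports spell it out inline)
def edgeP (g : List (List Int)) (v w : Nat) : Bool := (g.getD v []).getD w 0 == 1

-- consecutive edges along v :: t
def walkOk (g : List (List Int)) : Nat → List Nat → Bool
  | _, [] => true
  | v, u :: t => edgeP g v u && walkOk g u t

-- t is the tail of a simple directed cycle s :: t with k + 1 vertices, all tail vertices > s
def GoodT (g : List (List Int)) (s k : Nat) (t : List Nat) : Prop :=
  t.length = k ∧ t.Nodup ∧ (∀ x ∈ t, s < x ∧ x < g.length) ∧
    walkOk g s t = true ∧ edgeP g (t.getLastD s) s = true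

def markedUpTo (n j : Nat) : List Bool := (List.range n).map (fun x => decide (x < j))

theorem getLastD_cons_eq (t : List Nat) (u v : Nat) : (u :: t).getLastD v = t.getLastD u := by
  cases t <;> simp [List.getLastD]

theorem walkOk_append (g : List (List Int)) (v : Nat) (t : List Nat) (w : Nat) :
    walkOk g v (t ++ [w]) = (walkOk g v t && edgeP g (t.getLastD v) w) := by
  induction t generalizing v with
  | nil => simp [walkOk]
  | cons u t ih =>
    simp only [List.cons_append, walkOk, ih u, getLastD_cons_eq, Bool.and_assoc]

theorem getD_set_true (l : List Bool) (j x : Nat) :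
    (l.set j true).getD x false = if x = j ∧ j < l.length then true else l.getD x false := by
  simp only [List.getD_eq_getElem?_getD, List.getElem?_set]
  split_ifs with h1 h2 h3 h4 <;> simp_all <;> omega

theorem length_markedUpTo (n j : Nat) : (markedUpTo n j).length = n := by
  simp [markedUpTo]

theorem getD_markedUpTo (n j x : Nat) :
    (markedUpTo n j).getD x false = (decide (x < j) && decide (x < n)) := by
  by_cases hx : x < n
  · rw [List.getD_eq_getElem?_getD]
    simp [markedUpTo, hx]
  · rw [List.getD_eq_getElem?_getD]
    have : (markedUpTo n j).length ≤ x := by rw [length_markedUpTo]; omega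
    simp [List.getElem?_eq_none this, hx]

theorem markedUpTo_zero (n : Nat) : markedUpTo n 0 = List.replicate n false := by
  apply List.ext_getElem <;> simp [markedUpTo]

theorem markedUpTo_set (n j : Nat) (hj : j < n) :
    (markedUpTo n j).set j true = markedUpTo n (j + 1) := by
  unfold markedUpTo
  apply List.ext_getElem
  · simp
  · intro i h1 h2
    have hi : i < n := by simpa using h2
    rw [List.getElem_set]
    by_cases hij : j = i
    · subst hij
      simp
    · rw [if_neg hij]
      simp only [List.getElem_map, List.getElem_range]
      rw [decide_eq_decide]
      omega

theorem foldl_le_int {α : Type} (f : Int → α → Int) (h : ∀ c i, c ≤ f c i) :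
    ∀ (l : List α) (c : Int), c ≤ l.foldl f c := by
  intro l
  induction l with
  | nil => intro c; simp
  | cons i l ih => intro c; exact le_trans (h c i) (ih (f c i))

theorem foldl_shift_int {α : Type} (f : Int → α → Int) (h : ∀ c i, f c i = c + f 0 i) :
    ∀ (l : List α) (c : Int), l.foldl f c = c + l.foldl f 0 := by
  intro l
  induction l with
  | nil => intro c; simp
  | cons i l ih => intro c; simp only [List.foldl_cons]; rw [ih (f c i), ih (f 0 i), h c i]; ring

theorem foldl_sum_nonneg {α : Type} (f : Int → α → Int) (h : ∀ c i, f c i = c + f 0 i) :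
    ∀ (l : List α), (∀ i ∈ l, 0 ≤ f 0 i) → 0 ≤ l.foldl f 0 := by
  intro l
  induction l with
  | nil => intro _; simp
  | cons i l ih =>
    intro hnn
    rw [List.foldl_cons, foldl_shift_int f h l (f 0 i)]
    have h1 := hnn i (by simp)
    have h2 := ih (fun j hj => hnn j (by simp [hj]))
    omega

theorem foldl_pos_iff {α : Type} (f : Int → α → Int) (h : ∀ c i, f c i = c + f 0 i)
    (l : List α) (hnn : ∀ i ∈ l, 0 ≤ f 0 i) :
    (0 < l.foldl f 0 ↔ ∃ i ∈ l, 0 < f 0 i) := by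
  induction l with
  | nil => simp
  | cons i l ih =>
    rw [List.foldl_cons, foldl_shift_int f h l (f 0 i)]
    have h1 := hnn i (by simp)
    have h2 := foldl_sum_nonneg f h l (fun j hj => hnn j (by simp [hj]))
    have ih' := ih (fun j hj => hnn j (by simp [hj]))
    simp only [List.mem_cons]
    constructor
    · intro hp
      by_cases hi : 0 < f 0 i
      · exact ⟨i, Or.inl rfl, hi⟩
      · obtain ⟨j, hj, hjp⟩ := ih'.mp (by omega)
        exact ⟨j, Or.inr hj, hjp⟩
    · rintro ⟨j, hj | hj, hjp⟩
      · subst hj; omega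
      · have : 0 < l.foldl f 0 := ih'.mpr ⟨j, hj, hjp⟩
        omega

theorem dfsA_le (g : List (List Int)) (fuel : Nat) :
    ∀ (m : List Bool) (n : Int) (v s : Nat) (c : Int), c ≤ dfsA g fuel m n v s c := by
  induction fuel with
  | zero => intro m n v s c; simp [dfsA]
  | succ fuel ih =>
    intro m n v s c
    simp only [dfsA]
    split_ifs with h1 h2
    · omega
    · omega
    · refine foldl_le_int _ ?_ _ c
      intro c' i
      split_ifs with h3
      · exact ih _ _ _ _ _
      · exact le_refl c'

theorem dfsA_shift (g : List (List Int)) (fuel : Nat) :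
    ∀ (m : List Bool) (n : Int) (v s : Nat) (c : Int),
      dfsA g fuel m n v s c = c + dfsA g fuel m n v s 0 := by
  induction fuel with
  | zero => intro m n v s c; simp [dfsA]
  | succ fuel ih =>
    intro m n v s c
    simp only [dfsA]
    split_ifs with h1 h2
    · omega
    · omega
    · refine foldl_shift_int _ ?_ _ c
      intro c' i
      split_ifs with h3
      · exact ih _ _ _ _ c'
      · omega

theorem dfsA_pos_iff (g : List (List Int)) (s : Nat) :
    ∀ (k fuel : Nat) (m : List Bool) (v : Nat), k < fuel → m.length = g.length →
      (0 < dfsA g fuel m (k : Int) v s 0 ↔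
        ∃ t : List Nat, t.length = k ∧ t.Nodup ∧
          (∀ x ∈ t, x < g.length ∧ (m.set v true).getD x false = false) ∧
          walkOk g v t = true ∧ edgeP g (t.getLastD v) s = true) := by
  intro k
  induction k with
  | zero =>
    intro fuel m v hfuel hm
    obtain ⟨fuel, rfl⟩ : ∃ f, fuel = f + 1 := ⟨fuel - 1, by omega⟩
    simp only [dfsA]
    rw [if_pos (show ((0 : Nat) : Int) = 0 by norm_num)]
    constructor
    · intro hp
      by_cases hedge : ((g.getD v []).getD s 0 == 1) = true
      · exact ⟨[], rfl, List.nodup_nil, by simp, rfl, by simpa [edgeP, List.getLastD] using hedge⟩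
      · rw [if_neg hedge] at hp
        exact absurd hp (by omega)
    · rintro ⟨t, hlen, -, -, -, hlast⟩
      cases t with
      | cons a b => simp at hlen
      | nil =>
        simp only [List.getLastD] at hlast
        rw [if_pos (by simpa [edgeP] using hlast)]
        omega
  | succ k ih =>
    intro fuel m v hfuel hm
    obtain ⟨fuel, rfl⟩ : ∃ f, fuel = f + 1 := ⟨fuel - 1, by omega⟩
    have hk : k < fuel := by omega
    have hne : ¬(((k + 1 : Nat) : Int) = 0) := by push_cast; omega
    have hsub : ((k + 1 : Nat) : Int) - 1 = (k : Int) := by push_cast; ring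
    simp only [dfsA]
    rw [if_neg hne]
    simp only [hsub]
    set m1 := m.set v true with hm1
    have hm1len : m1.length = g.length := by rw [hm1, List.length_set, hm]
    set f : Int → Nat → Int := fun c i =>
      if (m1.getD i false == false) && ((g.getD v []).getD i 0 == 1)
      then dfsA g fuel m1 (k : Int) i s c else c with hf
    have hshift : ∀ c i, f c i = c + f 0 i := by
      intro c i
      simp only [hf]
      split_ifs with h2
      · rw [dfsA_shift]
      · omega
    have hnn : ∀ i ∈ List.range g.length, 0 ≤ f 0 i := by
      intro i _
      simp only [hf]
      split_ifs with h2
      · exact dfsA_le g fuel m1 (k : Int) i s 0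
      · exact le_refl 0
    rw [foldl_pos_iff f hshift (List.range g.length) hnn]
    constructor
    · rintro ⟨i, hi, hpos⟩
      rw [List.mem_range] at hi
      simp only [hf] at hpos
      by_cases hcond : ((m1.getD i false == false) && ((g.getD v []).getD i 0 == 1)) = true
      swap
      · rw [if_neg hcond] at hpos; exact absurd hpos (by omega)
      rw [if_pos hcond] at hpos
      simp only [Bool.and_eq_true, beq_iff_eq] at hcond
      obtain ⟨hunm, hedge⟩ := hcond
      obtain ⟨t, hlen, hnd, hmem, hwalk, hlast⟩ := (ih fuel m1 i hk hm1len).mp hpos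
      refine ⟨i :: t, by simp [hlen], ?_, ?_, ?_, ?_⟩
      · refine List.nodup_cons.mpr ⟨?_, hnd⟩
        intro hmemi
        have hx2 := (hmem i hmemi).2
        rw [getD_set_true] at hx2
        rw [if_pos ⟨rfl, by rw [hm1len]; exact hi⟩] at hx2
        simp at hx2
      · intro x hx
        rcases List.mem_cons.mp hx with rfl | hx
        · exact ⟨hi, hunm⟩
        · obtain ⟨hxn, hxm⟩ := hmem x hx
          rw [getD_set_true] at hxm
          refine ⟨hxn, ?_⟩
          split_ifs at hxm with hsp
          exact hxm
      · simp only [walkOk, Bool.and_eq_true]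
        exact ⟨by simp only [edgeP, beq_iff_eq]; exact hedge, hwalk⟩
      · rwa [getLastD_cons_eq]
    · rintro ⟨t, hlen, hnd, hmem, hwalk, hlast⟩
      obtain ⟨i, t', rfl⟩ : ∃ i t', t = i :: t' := by
        cases t with
        | nil => simp at hlen
        | cons a b => exact ⟨a, b, rfl⟩
      obtain ⟨hin, hunm⟩ := hmem i (by simp)
      simp only [walkOk, Bool.and_eq_true] at hwalk
      obtain ⟨hedge, hwalk'⟩ := hwalk
      refine ⟨i, List.mem_range.mpr hin, ?_⟩
      simp only [hf]
      rw [if_pos (by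
        simp only [Bool.and_eq_true, beq_iff_eq]
        exact ⟨hunm, by simpa [edgeP] using hedge⟩)]
      apply (ih fuel m1 i hk hm1len).mpr
      refine ⟨t', by simpa using hlen, (List.nodup_cons.mp hnd).2, ?_, hwalk', ?_⟩
      · intro x hx
        obtain ⟨hxn, hxm⟩ := hmem x (by simp [hx])
        refine ⟨hxn, ?_⟩
        rw [getD_set_true]
        rw [if_neg ?_]
        · exact hxm
        · rintro ⟨rfl, -⟩
          exact (List.nodup_cons.mp hnd).1 hx
      · rwa [getLastD_cons_eq] at hlast

theorem mem_drop_range (n m x : Nat) : x ∈ (List.range n).drop m ↔ m ≤ x ∧ x < n := by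
  constructor
  · intro hx
    obtain ⟨i, hi, hget⟩ := List.getElem_of_mem hx
    have hlen : i < n - m := by simpa using hi
    rw [List.getElem_drop, List.getElem_range] at hget
    omega
  · rintro ⟨h1, h2⟩
    refine List.mem_iff_getElem.mpr ⟨x - m, by simp; omega, ?_⟩
    rw [List.getElem_drop, List.getElem_range]
    omega

theorem pvWalkStep_iter_mem (g : List (List Int)) (s : Nat) (j : Nat) :
    ∀ p, p ∈ (List.range j).foldl (fun ps _ => pvWalkStep g s g.length ps) [[s]] ↔
      ∃ t : List Nat, p = s :: t ∧ t.length = j ∧ t.Nodup ∧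
        (∀ x ∈ t, s < x ∧ x < g.length) ∧ walkOk g s t = true := by
  induction j with
  | zero =>
    intro p
    simp [walkOk]
  | succ j ih =>
    intro p
    rw [List.range_succ, List.foldl_append, List.foldl_cons, List.foldl_nil]
    simp only [pvWalkStep, List.mem_flatMap, List.mem_map, List.mem_filter]
    constructor
    · rintro ⟨q, hq, v, ⟨hvmem, hcond⟩, rfl⟩
      obtain ⟨t, rfl, hlen, hnd, hbnd, hwalk⟩ := (ih q).mp hq
      simp only [Bool.and_eq_true, beq_iff_eq, Bool.not_eq_true', List.contains_eq_mem,
        decide_eq_false_iff_not, List.mem_cons, not_or] at hcond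
      obtain ⟨hedge, hnots, hnotin⟩ := hcond
      rw [mem_drop_range] at hvmem
      refine ⟨t ++ [v], by simp, by simp [hlen], ?_, ?_, ?_⟩
      · rw [← List.nodup_reverse, List.reverse_append]
        simp only [List.reverse_cons, List.reverse_nil, List.nil_append, List.singleton_append,
          List.nodup_cons, List.mem_reverse, List.nodup_reverse]
        exact ⟨hnotin, hnd⟩
      · intro x hx
        rcases List.mem_append.mp hx with hx | hx
        · exact hbnd x hx
        · rw [List.mem_singleton] at hx
          subst hx
          exact ⟨by omega, by omega⟩
      · rw [walkOk_append, hwalk, Bool.true_and]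
        simp only [edgeP, beq_iff_eq]
        rw [getLastD_cons_eq] at hedge
        exact hedge
    · rintro ⟨t1, rfl, hlen, hnd, hbnd, hwalk⟩
      have hne : t1 ≠ [] := by intro h; subst h; simp at hlen
      obtain ⟨t, v, rfl⟩ : ∃ t v, t1 = t ++ [v] := ⟨t1.dropLast, t1.getLast hne, (List.dropLast_append_getLast hne).symm⟩
      have hnd' : v ∉ t ∧ t.Nodup := by
        have h2 := hnd
        rw [← List.nodup_reverse, List.reverse_append] at h2
        simpa only [List.reverse_cons, List.reverse_nil, List.nil_append, List.singleton_append,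
          List.nodup_cons, List.mem_reverse, List.nodup_reverse] using h2
      rw [walkOk_append, Bool.and_eq_true] at hwalk
      obtain ⟨hwalk, hedge⟩ := hwalk
      obtain ⟨hvs, hvn⟩ := hbnd v (by simp)
      refine ⟨s :: t, (ih (s :: t)).mpr ⟨t, rfl, by simpa using hlen, hnd'.2,
          fun x hx => hbnd x (by simp [hx]), hwalk⟩, v, ⟨?_, ?_⟩, by simp⟩
      · rw [mem_drop_range]
        exact ⟨by omega, hvn⟩
      · simp only [Bool.and_eq_true, beq_iff_eq, Bool.not_eq_true', List.contains_eq_mem,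
          decide_eq_false_iff_not, List.mem_cons, not_or]
        refine ⟨?_, by omega, hnd'.1⟩
        rw [getLastD_cons_eq]
        simpa [edgeP] using hedge

theorem outerA (g : List (List Int)) (k : Nat) :
    ∀ (j : Nat), j ≤ g.length →
      (((List.range j).foldl
          (fun (st : Int × List Bool) (i : Nat) =>
            (dfsA g (g.length + 1) st.2 (k : Int) i i st.1, st.2.set i true))
          (0, List.replicate g.length false)).2 = markedUpTo g.length j) ∧
      (0 ≤ ((List.range j).foldl
          (fun (st : Int × List Bool) (i : Nat) =>
            (dfsA g (g.length + 1) st.2 (k : Int) i i st.1, st.2.set i true))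
          (0, List.replicate g.length false)).1) ∧
      ((0 < ((List.range j).foldl
          (fun (st : Int × List Bool) (i : Nat) =>
            (dfsA g (g.length + 1) st.2 (k : Int) i i st.1, st.2.set i true))
          (0, List.replicate g.length false)).1) ↔
        ∃ i, i < j ∧ 0 < dfsA g (g.length + 1) (markedUpTo g.length i) (k : Int) i i 0) := by
  intro j
  induction j with
  | zero =>
    intro _
    refine ⟨(markedUpTo_zero g.length).symm, le_refl 0, by simp⟩
  | succ j ih =>
    intro hj
    obtain ⟨hmk, hnn, hiff⟩ := ih (by omega)
    rw [List.range_succ, List.foldl_append, List.foldl_cons, List.foldl_nil]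
    set st := (List.range j).foldl
          (fun (st : Int × List Bool) (i : Nat) =>
            (dfsA g (g.length + 1) st.2 (k : Int) i i st.1, st.2.set i true))
          ((0 : Int), List.replicate g.length false) with hst
    have hD := dfsA_shift g (g.length + 1) st.2 (k : Int) j j st.1
    have hDnn := dfsA_le g (g.length + 1) st.2 (k : Int) j j 0
    rw [hmk] at hD hDnn
    refine ⟨?_, ?_, ?_⟩
    · show st.2.set j true = markedUpTo g.length (j + 1)
      rw [hmk]
      exact markedUpTo_set g.length j (by omega)
    · show 0 ≤ dfsA g (g.length + 1) st.2 (k : Int) j j st.1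
      rw [hmk, hD]
      omega
    · show (0 < dfsA g (g.length + 1) st.2 (k : Int) j j st.1) ↔
        ∃ i, i < j + 1 ∧ 0 < dfsA g (g.length + 1) (markedUpTo g.length i) (k : Int) i i 0
      rw [hmk, hD]
      constructor
      · intro hp
        by_cases hDj : 0 < dfsA g (g.length + 1) (markedUpTo g.length j) (k : Int) j j 0
        · exact ⟨j, by omega, hDj⟩
        · obtain ⟨i, hi, hip⟩ := hiff.mp (by omega)
          exact ⟨i, by omega, hip⟩
      · rintro ⟨i, hi, hip⟩
        by_cases hij : i = j
        · subst hij
          omega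
        · have hst1 : 0 < st.1 := hiff.mpr ⟨i, by omega, hip⟩
          omega

theorem goodT_bound (g : List (List Int)) (s k : Nat) (t : List Nat)
    (hs : s < g.length) (hg : GoodT g s k t) : s + k < g.length := by
  obtain ⟨hlen, hnd, hbnd, -, -⟩ := hg
  have hsub : t.toFinset ⊆ Finset.Ioo s g.length := by
    intro x hx
    rw [List.mem_toFinset] at hx
    obtain ⟨h1, h2⟩ := hbnd x hx
    exact Finset.mem_Ioo.mpr ⟨h1, h2⟩
  have hcard := Finset.card_le_card hsub
  rw [List.toFinset_card_of_nodup hnd, hlen, Nat.card_Ioo] at hcard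
  omega

theorem unmk_markedUpTo (n i x : Nat) (hi : i < n) (hx : x < n) :
    ((((markedUpTo n i).set i true).getD x false = false) ↔ (i < x)) := by
  rw [getD_set_true, length_markedUpTo]
  by_cases hxi : x = i
  · subst hxi
    rw [if_pos ⟨rfl, hi⟩]
    simp
  · rw [if_neg (by tauto), getD_markedUpTo]
    simp [hx]
    omega

theorem countCycles1_spec' (graph : List (List Int)) (length_cycle : Int)
    (h : Pre_countCycles1 graph length_cycle) :
    countCycles1 graph length_cycle = countCycles1_alt graph length_cycle := by
  obtain ⟨hlc1, -⟩ := h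
  by_cases hbig : (graph.length : Int) < length_cycle
  · rw [countCycles1, countCycles1_alt]
    have hgT : (decide (length_cycle < 1) || decide ((graph.length : Int) < length_cycle)) = true := by
      simp [hbig]
    rw [if_pos hgT]
    rw [PySem.List.pyRange_one]
    have h0 : (((graph.length : Int) - (length_cycle - 1)) - 0).toNat = 0 := by omega
    rw [h0]
    simp
  · rw [not_lt] at hbig
    have hn1 : 1 ≤ graph.length := by omega
    rw [countCycles1, countCycles1_alt]
    have hgF : ¬((decide (length_cycle < 1) || decide ((graph.length : Int) < length_cycle)) = true) := by
      simp
      omega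
    rw [if_neg hgF]
    set k := (length_cycle - 1).toNat with hkdef
    have hcast : length_cycle - 1 = (k : Int) := by rw [hkdef]; omega
    have hkn : k + 1 ≤ graph.length := by omega
    have hDiff : ∀ i, i < graph.length →
        (0 < dfsA graph (graph.length + 1) (markedUpTo graph.length i) (k : Int) i i 0 ↔
          ∃ t, GoodT graph i k t) := by
      intro i hi
      rw [dfsA_pos_iff graph i k (graph.length + 1) (markedUpTo graph.length i) i (by omega)
        (by rw [length_markedUpTo])]
      apply exists_congr
      intro t
      unfold GoodT
      constructor
      · rintro ⟨h1, h2, h3, h4, h5⟩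
        refine ⟨h1, h2, ?_, h4, h5⟩
        intro x hx
        obtain ⟨hxn, hxm⟩ := h3 x hx
        exact ⟨(unmk_markedUpTo graph.length i x hi hxn).mp hxm, hxn⟩
      · rintro ⟨h1, h2, h3, h4, h5⟩
        refine ⟨h1, h2, ?_, h4, h5⟩
        intro x hx
        obtain ⟨hxi, hxn⟩ := h3 x hx
        exact ⟨hxn, (unmk_markedUpTo graph.length i x hi hxn).mpr hxi⟩
    rw [PySem.List.pyRange_one]
    have hLt : (((graph.length : Int) - (length_cycle - 1)) - 0).toNat = graph.length - k := by
      rw [hcast]; omega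
    rw [hLt, List.foldl_map]
    simp only [zero_add, Int.toNat_natCast, hcast]
    obtain ⟨-, -, hiffA⟩ := outerA graph k (graph.length - k) (by omega)
    have hA : (0 < ((List.range (graph.length - k)).foldl
          (fun (st : Int × List Bool) (i : Nat) =>
            (dfsA graph (graph.length + 1) st.2 (k : Int) i i st.1, st.2.set i true))
          (0, List.replicate graph.length false)).1) ↔
        ∃ s, s < graph.length ∧ ∃ t, GoodT graph s k t := by
      rw [hiffA]
      constructor
      · rintro ⟨i, hi, hp⟩
        exact ⟨i, by omega, (hDiff i (by omega)).mp hp⟩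
      · rintro ⟨s, hs, t, hgt⟩
        have hb := goodT_bound graph s k t hs hgt
        exact ⟨s, by omega, (hDiff s hs).mpr ⟨t, hgt⟩⟩
    have hB : ((List.range graph.length).any (fun s =>
        ((List.range k).foldl
            (fun ps _ => pvWalkStep graph s graph.length ps) [[s]]).any
          (fun p => ((graph.getD (p.getLastD 0) []).getD s 0 == 1))) = true) ↔
        ∃ s, s < graph.length ∧ ∃ t, GoodT graph s k t := by
      rw [List.any_eq_true]
      constructor
      · rintro ⟨s, hsmem, hinner⟩
        rw [List.mem_range] at hsmem
        rw [List.any_eq_true] at hinner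
        obtain ⟨p, hp, hedge⟩ := hinner
        obtain ⟨t, rfl, hlen, hnd, hbnd, hwalk⟩ := (pvWalkStep_iter_mem graph s k p).mp hp
        refine ⟨s, hsmem, t, hlen, hnd, hbnd, hwalk, ?_⟩
        simp only [edgeP, beq_iff_eq]
        rw [getLastD_cons_eq] at hedge
        simpa using hedge
      · rintro ⟨s, hs, t, hlen, hnd, hbnd, hwalk, hlast⟩
        refine ⟨s, List.mem_range.mpr hs, List.any_eq_true.mpr
          ⟨s :: t, (pvWalkStep_iter_mem graph s k (s :: t)).mpr
            ⟨t, rfl, hlen, hnd, hbnd, hwalk⟩, ?_⟩⟩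
        rw [getLastD_cons_eq]
        simpa [edgeP] using hlast
    by_cases hcase : ∃ s, s < graph.length ∧ ∃ t, GoodT graph s k t
    · rw [if_pos (hA.mpr hcase), if_pos (hB.mpr hcase)]
    · rw [if_neg (fun hp => hcase (hA.mp hp)), if_neg (fun hb => hcase (hB.mp hb))]

-- ===== VERDICT (by name: the statement is the Claim_ definition above) =====
theorem countCycles1_spec : Claim_equal_countCycles1 := by
  intro graph length_cycle _ hpre
  unfold Spec_countCycles1
  exact countCycles1_spec' graph length_cycle hpre
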